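-- pv_equiv track=rewrite | github.com/samanehmoghaddam/Research-Assistant-Agentic-AI | src/ingestion/section_extractor.py | extract_section_titles
-- ===== SOURCE A (Python) =====
-- def extract_section_titles(text: str):
--     """Simple heuristic: uppercase or colon-ended lines considered section headers."""
--     lines = text.split("\n")
--     section_map = {}
--     current = "Introduction"
--
--     for i, line in enumerate(lines):
--         s = line.strip()
--         if len(s) > 3 and (s.isupper() or s.endswith(":")):
--             current = s.rstrip(":")
--         section_map[i] = current
--
--     return section_map
-- ===== SOURCE B (Python) =====
-- def extract_section_titles(text: str):
--     """Two-pass variant: collect header records first, then fill index ranges."""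
--     lines = text.split("\n")
--     headers = []
--     for i, line in enumerate(lines):
--         s = line.strip()
--         if len(s) > 3 and (s.isupper() or s.endswith(":")):
--             headers.append((i, s.rstrip(":")))
--     section_map = {}
--     prev_i, prev_t = 0, "Introduction"
--     for i, t in headers:
--         for j in range(prev_i, i):
--             section_map[j] = prev_t
--         prev_i, prev_t = i, t
--     for j in range(prev_i, len(lines)):
--         section_map[j] = prev_t
--     return section_map
-- ===== Notes on version B (the rewrite author's own statement) =====
-- stated objective: alternative
-- what changed: Instead of threading a running section title through every line, B first collects header records (index, title) in one pass and then fills the section map range-by-range between consecutive header indices, with the default title for the prefix before the first header.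
import Mathlib
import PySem

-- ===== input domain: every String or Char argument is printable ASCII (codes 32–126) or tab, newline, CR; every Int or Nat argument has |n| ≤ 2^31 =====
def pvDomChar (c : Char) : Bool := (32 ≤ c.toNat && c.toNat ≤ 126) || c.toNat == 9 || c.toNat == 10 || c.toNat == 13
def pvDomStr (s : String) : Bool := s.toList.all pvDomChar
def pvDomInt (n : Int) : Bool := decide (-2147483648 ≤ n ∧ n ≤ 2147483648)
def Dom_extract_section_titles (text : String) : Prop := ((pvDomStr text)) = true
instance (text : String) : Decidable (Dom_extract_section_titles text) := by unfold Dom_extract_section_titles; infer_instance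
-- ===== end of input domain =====

-- B replaces A's running-"current" accumulator by a two-pass header-collection + range-fill; same cost, different decomposition.

-- shared leaf helpers (both Pythons call the same string methods on each line)
-- s.isupper() on the ASCII domain: at least one uppercase letter and no lowercase letter
def pyStrIsupper (s : String) : Bool :=
  s.toList.any PySem.Chars.isupper && !(s.toList.any PySem.Chars.islower)

-- s.rstrip(":"): drop all trailing ':' (exact hand port; PySem has no one-sided stripChars)
def pyRstripColons (s : String) : String :=
  String.ofList ((s.toList.reverse.dropWhile (· == ':')).reverse)

-- header test on the stripped line: len(s) > 3 and (s.isupper() or s.endswith(":"))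
def isHeader (s : String) : Bool :=
  decide (3 < PySem.Str.len s) && (pyStrIsupper s || PySem.Str.endswith s ":")

-- ===== PORT A =====
def extract_section_titles (text : String) : List (Int × String) :=
  let lines := (PySem.Str.split? text "\n").getD []
  let res := (PySem.List.enumerate lines 0).foldl
    (fun (st : PySem.Dict Int String × String) p =>
      let s := PySem.Str.strip p.2
      let current := if isHeader s then pyRstripColons s else st.2
      (st.1.insert p.1 current, current))
    (PySem.Dict.empty, "Introduction")
  res.1.items

-- ===== PORT B =====
def extract_section_titles_alt (text : String) : List (Int × String) :=
  let lines := (PySem.Str.split? text "\n").getD []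
  let headers := (PySem.List.enumerate lines 0).foldl
    (fun (acc : List (Int × String)) p =>
      let s := PySem.Str.strip p.2
      if isHeader s then acc ++ [(p.1, pyRstripColons s)] else acc) []
  let st := headers.foldl
    (fun (st : PySem.Dict Int String × Int × String) p =>
      ((PySem.List.pyRange st.2.1 p.1).foldl (fun d j => d.insert j st.2.2) st.1, p.1, p.2))
    (PySem.Dict.empty, 0, "Introduction")
  ((PySem.List.pyRange st.2.1 (lines.length : Int)).foldl (fun d j => d.insert j st.2.2) st.1).items

-- ===== PRECONDITION & SPEC =====
def Spec_extract_section_titles (text : String) (out : List (Int × String)) : Prop := out = extract_section_titles_alt text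
instance (text : String) (out : List (Int × String)) : Decidable (Spec_extract_section_titles text out) := by unfold Spec_extract_section_titles; infer_instance

-- ===== CLAIM (what is proved, stated in full; the proofs are below) =====
def Claim_equal_extract_section_titles : Prop := ∀ (text : String), Dom_extract_section_titles text → Spec_extract_section_titles text (extract_section_titles text)

-- ===== LEMMAS AND PROOFS =====

-- normal form: the (index, title) list A's dict accumulates, line by line
def specList (ls : List String) (cur : String) (i : Int) : List (Int × String) :=
  match ls with
  | [] => []
  | l :: ls =>
      let c := if isHeader (PySem.Str.strip l) then pyRstripColons (PySem.Str.strip l) else cur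
      (i, c) :: specList ls c (i + 1)

-- header records (index, title) from index i
def hdrEnum (ls : List String) (i : Int) : List (Int × String) :=
  match ls with
  | [] => []
  | l :: ls =>
      if isHeader (PySem.Str.strip l) then
        (i, pyRstripColons (PySem.Str.strip l)) :: hdrEnum ls (i + 1)
      else hdrEnum ls (i + 1)

-- range-fill normal form for B
def specFrom (i n : Int) (t : String) (hs : List (Int × String)) : List (Int × String) :=
  match hs with
  | [] => (PySem.List.pyRange i n).map (fun j => (j, t))
  | (h, t') :: rest => (PySem.List.pyRange i h).map (fun j => (j, t)) ++ specFrom h n t' rest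

theorem hdrEnum_ge (ls : List String) (i : Int) : ∀ p ∈ hdrEnum ls i, i ≤ p.1 := by
  induction ls generalizing i with
  | nil => simp [hdrEnum]
  | cons l ls ih =>
    intro p hp
    simp only [hdrEnum] at hp
    split at hp
    · rw [List.mem_cons] at hp
      rcases hp with h | h
      · simp [h]
      · have := ih (i + 1) p h; omega
    · have := ih (i + 1) p hp; omega

theorem hdrEnum_pairwise (ls : List String) (i : Int) :
    (hdrEnum ls i).Pairwise (fun p q => p.1 < q.1) := by
  induction ls generalizing i with
  | nil => simp [hdrEnum]
  | cons l ls ih =>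
    simp only [hdrEnum]
    split
    · exact List.Pairwise.cons (fun q hq => by have := hdrEnum_ge ls (i + 1) q hq; omega) (ih (i + 1))
    · exact ih (i + 1)

theorem lemA (ls : List String) (cur : String) (i : Int) (d : PySem.Dict Int String)
    (hd : ∀ k, d.contains k = true → k < i) :
    ((PySem.List.enumerate ls i).foldl
      (fun (st : PySem.Dict Int String × String) p =>
        let s := PySem.Str.strip p.2
        let current := if isHeader s then pyRstripColons s else st.2
        (st.1.insert p.1 current, current)) (d, cur)).1.items
    = d.items ++ specList ls cur i := by
  induction ls generalizing cur i d with
  | nil => simp [PySem.List.enumerate, specList]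
  | cons l ls ih =>
    rw [PySem.List.enumerate_cons]
    simp only [List.foldl_cons]
    set c := if isHeader (PySem.Str.strip l) then pyRstripColons (PySem.Str.strip l) else cur with hc
    have hfresh : d.contains i = false := by
      cases h : d.contains i
      · rfl
      · exact absurd (hd i h) (by omega)
    have hd' : ∀ k, (d.insert i c).contains k = true → k < i + 1 := by
      intro k hk
      rw [PySem.Dict.contains_insert] at hk
      rcases Bool.or_eq_true_iff.mp hk with h | h
      · have : k = i := by exact_mod_cast eq_of_beq h
        omega
      · have := hd k h; omega
    rw [ih c (i + 1) (d.insert i c) hd']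
    rw [PySem.Dict.items_insert_of_not_contains d c hfresh]
    simp [specList, ← hc]

-- contains after a constant-value insert loop
theorem contains_foldl_insert_const (l : List Int) (v : String) (d : PySem.Dict Int String) (k : Int) :
    ((l.foldl (fun d j => d.insert j v) d).contains k) = (decide (k ∈ l) || d.contains k) := by
  induction l generalizing d with
  | nil => simp
  | cons a l ih =>
    simp only [List.foldl_cons, ih, PySem.Dict.contains_insert]
    by_cases h : k ∈ a :: l <;> by_cases h2 : k = a <;> simp_all

theorem lemFill (hs : List (Int × String)) (d : PySem.Dict Int String) (pi : Int) (pt : String) (n : Int)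
    (hd : ∀ k, d.contains k = true → k < pi)
    (hpw : hs.Pairwise (fun p q => p.1 < q.1))
    (hge : ∀ p ∈ hs, pi ≤ p.1) :
    (let st := hs.foldl
      (fun (st : PySem.Dict Int String × Int × String) p =>
        ((PySem.List.pyRange st.2.1 p.1).foldl (fun d j => d.insert j st.2.2) st.1, p.1, p.2))
      (d, pi, pt)
     ((PySem.List.pyRange st.2.1 n).foldl (fun d j => d.insert j st.2.2) st.1).items)
    = d.items ++ specFrom pi n pt hs := by
  induction hs generalizing d pi pt with
  | nil =>
    simp only [List.foldl_nil, specFrom]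
    exact PySem.Dict.items_foldl_insert_fresh (PySem.List.pyRange pi n) id (fun _ => pt) d
      (by intro a ha
          simp only [id_eq]
          cases h : d.contains a
          · rfl
          · have := hd a h
            have := PySem.List.mem_pyRange_one.mp ha
            omega)
      (by simpa using PySem.List.nodup_pyRange_one pi n)
  | cons p rest ih =>
    obtain ⟨h, t⟩ := p
    simp only [List.foldl_cons]
    have hpi_h : pi ≤ h := hge (h, t) (by simp)
    have hfill : ((PySem.List.pyRange pi h).foldl (fun d j => d.insert j pt) d).items
        = d.items ++ (PySem.List.pyRange pi h).map (fun j => (j, pt)) := by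
      have := PySem.Dict.items_foldl_insert_fresh (PySem.List.pyRange pi h) id (fun _ => pt) d
        (by intro a ha
            simp only [id_eq]
            cases hc : d.contains a
            · rfl
            · have := hd a hc
              have := PySem.List.mem_pyRange_one.mp ha
              omega)
        (by simpa using PySem.List.nodup_pyRange_one pi h)
      simpa using this
    have hd' : ∀ k, ((PySem.List.pyRange pi h).foldl (fun d j => d.insert j pt) d).contains k = true → k < h := by
      intro k hk
      rw [contains_foldl_insert_const] at hk
      rcases Bool.or_eq_true_iff.mp hk with h1 | h1
      · have := PySem.List.mem_pyRange_one.mp (of_decide_eq_true h1); omega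
      · have := hd k h1; omega
    rw [ih _ h t hd' (List.Pairwise.of_cons hpw)
      (fun q hq => le_of_lt ((List.pairwise_cons.mp hpw).1 q hq))]
    rw [hfill, specFrom, List.append_assoc]

theorem map_filter_enum (ls : List String) (i : Int) :
    ((PySem.List.enumerate ls i).filter (fun p => isHeader (PySem.Str.strip p.2))).map
      (fun p => (p.1, pyRstripColons (PySem.Str.strip p.2)))
    = hdrEnum ls i := by
  induction ls generalizing i with
  | nil => simp [hdrEnum, PySem.List.enumerate]
  | cons l ls ih =>
    rw [PySem.List.enumerate_cons]
    simp only [List.filter_cons, hdrEnum]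
    split
    · simp_all
    · simp_all

theorem hdrEnum_filter (ls : List String) (i : Int) :
    (PySem.List.enumerate ls i).foldl
      (fun (acc : List (Int × String)) p =>
        if isHeader (PySem.Str.strip p.2) then acc ++ [(p.1, pyRstripColons (PySem.Str.strip p.2))] else acc) []
    = hdrEnum ls i := by
  have hrw := PySem.List.foldl_append_if (fun (p : Int × String) => isHeader (PySem.Str.strip p.2))
      (fun (p : Int × String) => (p.1, pyRstripColons (PySem.Str.strip p.2)))
      (PySem.List.enumerate ls i) []
  rw [hrw, List.nil_append, map_filter_enum]

-- peel one index off the front of a range-fill whose headers all lie beyond i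
theorem specFrom_peel (hs : List (Int × String)) (i n : Int) (t : String)
    (hgt : ∀ p ∈ hs, i < p.1) (hn : hs = [] → i < n) :
    specFrom i n t hs = (i, t) :: specFrom (i + 1) n t hs := by
  cases hs with
  | nil =>
    simp only [specFrom]
    rw [PySem.List.pyRange_one_cons (hn rfl)]
    simp
  | cons p rest =>
    obtain ⟨h, t'⟩ := p
    simp only [specFrom]
    rw [PySem.List.pyRange_one_cons (hgt (h, t') (by simp))]
    simp

theorem specList_eq_specFrom (ls : List String) (cur : String) (i : Int) :
    specList ls cur i = specFrom i (i + ls.length) cur (hdrEnum ls i) := by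
  induction ls generalizing cur i with
  | nil => simp [specList, hdrEnum, specFrom, PySem.List.pyRange_one_eq_nil (le_refl i)]
  | cons l ls ih =>
    simp only [specList, hdrEnum]
    have hlen : (i : Int) + (l :: ls).length = (i + 1) + ls.length := by
      simp; omega
    split
    · -- header line
      rw [hlen]
      simp only [specFrom]
      rw [PySem.List.pyRange_one_eq_nil (le_refl i), List.map_nil, List.nil_append]
      rw [specFrom_peel (hdrEnum ls (i + 1)) i ((i + 1) + ls.length) _
        (fun q hq => by have := hdrEnum_ge ls (i + 1) q hq; omega)
        (fun _ => by omega)]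
      rw [ih _ (i + 1)]
    · -- non-header line
      rw [hlen]
      rw [specFrom_peel (hdrEnum ls (i + 1)) i ((i + 1) + ls.length) cur
        (fun q hq => by have := hdrEnum_ge ls (i + 1) q hq; omega)
        (fun _ => by omega)]
      rw [ih cur (i + 1)]

-- ===== VERDICT (by name: the statement is the Claim_ definition above) =====
theorem extract_section_titles_spec : Claim_equal_extract_section_titles := by
  intro text _
  unfold Spec_extract_section_titles extract_section_titles extract_section_titles_alt
  set lines := (PySem.Str.split? text "\n").getD [] with hlines
  have hA := lemA lines "Introduction" 0 PySem.Dict.empty (by simp)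
  have hB := lemFill (hdrEnum lines 0) PySem.Dict.empty 0 "Introduction" (lines.length : Int)
    (by simp) (hdrEnum_pairwise lines 0) (hdrEnum_ge lines 0)
  simp only [hdrEnum_filter lines 0]
  simp only at hA hB
  rw [hA, hB, specList_eq_specFrom]
  simp
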